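-- pv_equiv track=rewrite | github.com/GhaziZouari/PharMES_python | Weighing.py | split_into_two_lines
-- ===== SOURCE A (Python) =====
-- def split_into_two_lines(text, max_first_line_length=35):
--     words = text.split()
--     first_line = []
--     second_line = []
--     current_length = 0
--
--     for word in words:
--         if current_length + len(word) <= max_first_line_length:
--             first_line.append(word)
--             current_length += len(word) + 1
--         else:
--             second_line.append(word)
--             current_length += len(word) + 1
--
--     if not second_line:
--         return ' '.join(first_line), ""
--     return ' '.join(first_line), ' '.join(second_line)
-- ===== SOURCE B (Python) =====
-- def split_into_two_lines(text, max_first_line_length=35):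
--     words = text.split()
--     sums = []
--     total = 0
--     for w in words:
--         total += len(w) + 1
--         sums.append(total)
--     cut = sum(1 for s in sums if s <= max_first_line_length + 1)
--     return ' '.join(words[:cut]), ' '.join(words[cut:])
-- ===== Notes on version B (the rewrite author's own statement) =====
-- stated objective: alternative
-- what changed: Replaces A's single pass with a (first_line, second_line, current_length) accumulator and two branch appends by a prefix-sum pass: build the running totals, count how many are <= limit+1 (the cut index, valid because the totals are strictly increasing), and return slices words[:cut] and words[cut:].
import Mathlib
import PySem

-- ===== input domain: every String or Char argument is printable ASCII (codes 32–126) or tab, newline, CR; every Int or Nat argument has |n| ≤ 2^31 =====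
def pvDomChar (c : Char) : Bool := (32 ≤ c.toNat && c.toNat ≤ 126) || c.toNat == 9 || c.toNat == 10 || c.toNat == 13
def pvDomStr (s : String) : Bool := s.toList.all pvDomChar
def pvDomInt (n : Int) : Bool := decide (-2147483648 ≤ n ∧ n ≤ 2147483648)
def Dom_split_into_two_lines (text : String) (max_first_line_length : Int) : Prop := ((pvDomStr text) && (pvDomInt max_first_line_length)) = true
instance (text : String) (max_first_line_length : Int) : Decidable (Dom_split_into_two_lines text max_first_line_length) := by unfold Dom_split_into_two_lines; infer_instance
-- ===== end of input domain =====

-- B replaces A's two-branch accumulator loop by prefix sums: a count of the sums ≤ limit+1 gives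
-- the cut index, and the two lines are slices words[:cut] / words[cut:] (objective: alternative).

-- ===== PORT A =====
-- the for loop over words with state (first_line, second_line, current_length)
def pvLoopA (M : Int) : List String → List String × List String × Int → List String × List String × Int
  | [], st => st
  | w :: ws, (first, second, cl) =>
      if cl + PySem.Str.len w ≤ M then
        pvLoopA M ws (first ++ [w], second, cl + PySem.Str.len w + 1)
      else
        pvLoopA M ws (first, second ++ [w], cl + PySem.Str.len w + 1)

def split_into_two_lines (text : String) (max_first_line_length : Int) : String × String :=
  let words := PySem.Str.split₀ text
  let res := pvLoopA max_first_line_length words ([], [], 0)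
  if res.2.1 = [] then (PySem.Str.join " " res.1, "")
  else (PySem.Str.join " " res.1, PySem.Str.join " " res.2.1)

-- ===== PORT B =====
-- the prefix-sum loop: sums.append(total) with total += len(w) + 1
def pvSumsB : List String → Int → List Int
  | [], _ => []
  | w :: ws, total =>
      let t := total + PySem.Str.len w + 1
      t :: pvSumsB ws t

def split_into_two_lines_alt (text : String) (max_first_line_length : Int) : String × String :=
  let words := PySem.Str.split₀ text
  let sums := pvSumsB words 0
  let cut : Nat := sums.countP (fun s => decide (s ≤ max_first_line_length + 1))
  (PySem.Str.join " " (PySem.List.slice words none (some (cut : Int))),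
   PySem.Str.join " " (PySem.List.slice words (some (cut : Int)) none))

-- ===== PRECONDITION & SPEC =====
def Spec_split_into_two_lines (text : String) (max_first_line_length : Int) (out : String × String) : Prop := out = split_into_two_lines_alt text max_first_line_length
instance (text : String) (max_first_line_length : Int) (out : String × String) : Decidable (Spec_split_into_two_lines text max_first_line_length out) := by unfold Spec_split_into_two_lines; infer_instance

-- ===== CLAIM (what is proved, stated in full; the proofs are below) =====
def Claim_equal_split_into_two_lines : Prop := ∀ (text : String) (max_first_line_length : Int), Dom_split_into_two_lines text max_first_line_length → Spec_split_into_two_lines text max_first_line_length (split_into_two_lines text max_first_line_length)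

-- ===== LEMMAS AND PROOFS =====

-- every prefix sum strictly exceeds the starting total
theorem pvSumsB_gt (ws : List String) (c : Int) : ∀ s ∈ pvSumsB ws c, c < s := by
  induction ws generalizing c with
  | nil => simp [pvSumsB]
  | cons w ws ih =>
      intro s hs
      simp only [pvSumsB, List.mem_cons] at hs
      have hlen : 0 ≤ PySem.Str.len w := by simp [PySem.Str.len_eq]
      rcases hs with h | h
      · omega
      · have := ih _ _ h
        omega

-- A's loop lands on B's cut: first_line = take cut, second_line = drop cut
theorem pvLoopA_take_drop (M : Int) (ws : List String) (first second : List String) (c : Int) :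
    (pvLoopA M ws (first, second, c)).1
      = first ++ ws.take ((pvSumsB ws c).countP (fun s => decide (s ≤ M + 1)))
    ∧ (pvLoopA M ws (first, second, c)).2.1
      = second ++ ws.drop ((pvSumsB ws c).countP (fun s => decide (s ≤ M + 1))) := by
  induction ws generalizing first second c with
  | nil => simp [pvLoopA, pvSumsB]
  | cons w ws ih =>
      simp only [pvLoopA, pvSumsB, List.countP_cons, decide_eq_true_eq]
      by_cases h : c + PySem.Str.len w ≤ M
      · rw [if_pos h, if_pos (show c + PySem.Str.len w + 1 ≤ M + 1 by omega)]
        obtain ⟨h1, h2⟩ := ih (first ++ [w]) second (c + PySem.Str.len w + 1)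
        rw [h1, h2]
        simp [List.take_succ_cons, List.drop_succ_cons]
      · rw [if_neg h, if_neg (show ¬ (c + PySem.Str.len w + 1 ≤ M + 1) by omega)]
        have hzero : (pvSumsB ws (c + PySem.Str.len w + 1)).countP
            (fun s => decide (s ≤ M + 1)) = 0 := by
          rw [List.countP_eq_zero]
          intro s hs
          have := pvSumsB_gt ws (c + PySem.Str.len w + 1) s hs
          simp only [decide_eq_true_eq]
          omega
        obtain ⟨h1, h2⟩ := ih first (second ++ [w]) (c + PySem.Str.len w + 1)
        rw [h1, h2, hzero]
        simp

-- ===== VERDICT (by name: the statement is the Claim_ definition above) =====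
theorem split_into_two_lines_spec : Claim_equal_split_into_two_lines := by
  intro text M _
  unfold Spec_split_into_two_lines split_into_two_lines split_into_two_lines_alt
  dsimp only
  obtain ⟨h1, h2⟩ := pvLoopA_take_drop M (PySem.Str.split₀ text) [] [] 0
  simp only [List.nil_append] at h1 h2
  rw [PySem.List.slice_to _ (by positivity), PySem.List.slice_from _ (by positivity)]
  simp only [Int.toNat_natCast, h1, h2]
  by_cases hd : (PySem.Str.split₀ text).drop
      ((pvSumsB (PySem.Str.split₀ text) 0).countP (fun s => decide (s ≤ M + 1))) = []
  · rw [if_pos hd, hd]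
    rfl
  · rw [if_neg hd]
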